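-- pv_equiv track=rewrite | github.com/ocenandor/whitehead | lming/utils.py | prepend_yes_no_multilabel
-- ===== SOURCE A (Python) =====
-- from typing import List, Dict, Any, Union
--
-- def prepend_yes_no_multilabel(
--     words: List[str],
--     multilabels: List[List[int]],
--     fdim: int,
--     yes_token: str = 'y',
--     no_token: str = 'n',
--     delimiter_token: str = ':',
-- ):
--     multilabels = [[yes_token if idx in m else no_token for idx in range(fdim + 1)] for m in multilabels]
--     return [f'{" ".join(m)} {delimiter_token} {s}' for m, s in zip(multilabels, words)]
-- ===== SOURCE B (Python) =====
-- def prepend_yes_no_multilabel(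
--     words,
--     multilabels,
--     fdim,
--     yes_token='y',
--     no_token='n',
--     delimiter_token=':',
-- ):
--     out = []
--     for m, s in zip(multilabels, words):
--         row = [no_token] * (fdim + 1)
--         for idx in m:
--             if 0 <= idx <= fdim:
--                 row[idx] = yes_token
--         out.append(f'{" ".join(row)} {delimiter_token} {s}')
--     return out
-- ===== Notes on version B (the rewrite author's own statement) =====
-- stated objective: alternative
-- what changed: Replaces A's dense per-position membership scan ('idx in m' for every index 0..fdim, built in two comprehension passes) with a single explicit loop over zip(multilabels, words) that initializes a row of no-tokens and sparsely marks the in-range label indices.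
import Mathlib
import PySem

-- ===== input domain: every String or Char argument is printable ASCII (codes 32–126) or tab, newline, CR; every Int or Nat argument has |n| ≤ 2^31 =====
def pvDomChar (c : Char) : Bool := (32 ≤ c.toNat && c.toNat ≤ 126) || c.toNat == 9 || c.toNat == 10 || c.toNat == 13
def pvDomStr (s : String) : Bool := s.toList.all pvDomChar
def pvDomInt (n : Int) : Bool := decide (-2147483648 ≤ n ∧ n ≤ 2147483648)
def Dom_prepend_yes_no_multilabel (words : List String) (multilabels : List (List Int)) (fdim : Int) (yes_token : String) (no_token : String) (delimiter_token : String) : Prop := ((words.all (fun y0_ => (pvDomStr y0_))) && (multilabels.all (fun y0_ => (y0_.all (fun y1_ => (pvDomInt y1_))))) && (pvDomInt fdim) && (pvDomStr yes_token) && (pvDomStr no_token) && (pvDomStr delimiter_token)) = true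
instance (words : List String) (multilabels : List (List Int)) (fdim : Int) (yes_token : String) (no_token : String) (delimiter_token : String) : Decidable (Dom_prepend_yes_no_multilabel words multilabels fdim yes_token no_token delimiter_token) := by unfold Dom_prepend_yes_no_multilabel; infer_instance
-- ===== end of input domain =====

-- B replaces A's dense per-position membership scan with a sparse initialize-then-mark pass over each multilabel (alternative algorithm, same measured cost).

-- ===== PORT A =====
def prepend_yes_no_multilabel (words : List String) (multilabels : List (List Int)) (fdim : Int) (yes_token : String) (no_token : String) (delimiter_token : String) : List String :=
  -- multilabels = [[yes if idx in m else no for idx in range(fdim+1)] for m in multilabels]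
  let ml : List (List String) :=
    multilabels.map (fun m =>
      (PySem.List.pyRange 0 (fdim + 1) 1).map (fun idx => if idx ∈ m then yes_token else no_token))
  -- [f'{" ".join(m)} {delimiter} {s}' for m, s in zip(ml, words)]
  (ml.zip words).map (fun p => PySem.Str.join " " p.1 ++ " " ++ delimiter_token ++ " " ++ p.2)

-- ===== PORT B =====
-- row = [no_token]*(fdim+1); for idx in m: if 0 <= idx <= fdim: row[idx] = yes_token
def pvMarkRow (m : List Int) (fdim : Int) (yes_token : String) (no_token : String) : List String :=
  m.foldl (fun row idx => if 0 ≤ idx ∧ idx ≤ fdim then PySem.List.pySetD row idx yes_token else row)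
    (PySem.List.pyRepeat [no_token] (fdim + 1))

def prepend_yes_no_multilabel_alt (words : List String) (multilabels : List (List Int)) (fdim : Int) (yes_token : String) (no_token : String) (delimiter_token : String) : List String :=
  (multilabels.zip words).foldl (fun out p =>
    out ++ [PySem.Str.join " " (pvMarkRow p.1 fdim yes_token no_token) ++ " " ++ delimiter_token ++ " " ++ p.2]) []

-- ===== PRECONDITION & SPEC =====
def Spec_prepend_yes_no_multilabel (words : List String) (multilabels : List (List Int)) (fdim : Int) (yes_token : String) (no_token : String) (delimiter_token : String) (out : List String) : Prop := out = prepend_yes_no_multilabel_alt words multilabels fdim yes_token no_token delimiter_token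
instance (words : List String) (multilabels : List (List Int)) (fdim : Int) (yes_token : String) (no_token : String) (delimiter_token : String) (out : List String) : Decidable (Spec_prepend_yes_no_multilabel words multilabels fdim yes_token no_token delimiter_token out) := by unfold Spec_prepend_yes_no_multilabel; infer_instance

-- ===== CLAIM (what is proved, stated in full; the proofs are below) =====
def Claim_equal_prepend_yes_no_multilabel : Prop := ∀ (words : List String) (multilabels : List (List Int)) (fdim : Int) (yes_token : String) (no_token : String) (delimiter_token : String), Dom_prepend_yes_no_multilabel words multilabels fdim yes_token no_token delimiter_token → Spec_prepend_yes_no_multilabel words multilabels fdim yes_token no_token delimiter_token (prepend_yes_no_multilabel words multilabels fdim yes_token no_token delimiter_token)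

-- ===== LEMMAS AND PROOFS =====

-- the marking fold preserves the row length
theorem pvMark_length (fdim : Int) (yes_token : String) (m : List Int) (acc : List String) :
    (m.foldl (fun row idx => if 0 ≤ idx ∧ idx ≤ fdim then PySem.List.pySetD row idx yes_token else row) acc).length = acc.length := by
  induction m generalizing acc with
  | nil => rfl
  | cons x m ih =>
    simp only [List.foldl_cons]
    rw [ih]
    split_ifs with h
    · rw [PySem.List.pySetD_of_nonneg _ _ h.1, List.length_set]
    · rfl

-- pointwise value of the marking fold
theorem pvMark_getElem? (fdim : Int) (yes_token : String) (m : List Int) (acc : List String)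
    (hacc : (acc.length : Int) ≤ fdim + 1) (i : Nat) (hi : i < acc.length) :
    (m.foldl (fun row idx => if 0 ≤ idx ∧ idx ≤ fdim then PySem.List.pySetD row idx yes_token else row) acc)[i]? =
      if (i : Int) ∈ m then some yes_token else acc[i]? := by
  induction m generalizing acc with
  | nil => simp
  | cons x m ih =>
    simp only [List.foldl_cons]
    have hstep : ∀ r : List String, r = (if 0 ≤ x ∧ x ≤ fdim then PySem.List.pySetD acc x yes_token else acc) →
        r.length = acc.length := by
      intro r hr
      split_ifs at hr with h
      · rw [hr, PySem.List.pySetD_of_nonneg _ _ h.1, List.length_set]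
      · rw [hr]
    rw [ih _ (by rw [hstep _ rfl]; exact hacc) (by rw [hstep _ rfl]; exact hi)]
    by_cases hx : x = (i : Int)
    · subst hx
      have hg : (0:Int) ≤ (i : Int) ∧ (i : Int) ≤ fdim := by
        constructor
        · exact Int.natCast_nonneg i
        · omega
      rw [if_pos hg, PySem.List.pySetD_of_nonneg _ _ hg.1]
      simp only [Int.toNat_natCast, List.getElem?_set, hi, if_pos trivial]
      simp [List.mem_cons]
    · by_cases hm : (i : Int) ∈ m
      · rw [if_pos hm, if_pos (List.mem_cons_of_mem _ hm)]
      · have hm' : (i : Int) ∉ x :: m := by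
          simp only [List.mem_cons, not_or]
          exact ⟨fun h => hx h.symm, hm⟩
        rw [if_neg hm, if_neg hm']
        split_ifs with h
        · rw [PySem.List.pySetD_of_nonneg _ _ h.1, List.getElem?_set]
          rw [if_neg (by omega)]
        · rfl

-- B's sparse row equals A's dense row
theorem pvRow_eq (fdim : Int) (yes_token no_token : String) (m : List Int) :
    pvMarkRow m fdim yes_token no_token =
      (PySem.List.pyRange 0 (fdim + 1) 1).map (fun idx => if idx ∈ m then yes_token else no_token) := by
  have hrep : PySem.List.pyRepeat [no_token] (fdim + 1) = List.replicate (fdim + 1).toNat no_token :=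
    PySem.List.pyRepeat_singleton _ _
  apply List.ext_getElem?
  intro i
  by_cases hi : i < (fdim + 1).toNat
  · have hlen : (List.replicate (fdim + 1).toNat no_token).length = (fdim + 1).toNat := List.length_replicate
    have h1 := pvMark_getElem? fdim yes_token m (List.replicate (fdim + 1).toNat no_token)
        (by rw [hlen]; omega) i (by rw [hlen]; exact hi)
    unfold pvMarkRow
    rw [hrep, h1]
    have hcast : fdim + 1 = (((fdim + 1).toNat : Nat) : Int) := by omega
    rw [hcast, PySem.List.getElem?_map_pyRange_zero _ _ _ hi]
    by_cases hm : (i : Int) ∈ m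
    · rw [if_pos hm, if_pos hm]
    · rw [if_neg hm, if_neg hm, List.getElem?_replicate]
      simp only [Int.toNat_natCast]
      rw [if_pos hi]
  · have h2 : (pvMarkRow m fdim yes_token no_token).length = (fdim + 1).toNat := by
      unfold pvMarkRow
      rw [pvMark_length, hrep, List.length_replicate]
    rw [List.getElem?_eq_none (by omega), List.getElem?_eq_none]
    simp only [List.length_map, PySem.List.length_pyRange_one]
    omega

theorem prepend_yes_no_multilabel_eq (words : List String) (multilabels : List (List Int)) (fdim : Int) (yes_token : String) (no_token : String) (delimiter_token : String) :
    prepend_yes_no_multilabel words multilabels fdim yes_token no_token delimiter_token =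
      prepend_yes_no_multilabel_alt words multilabels fdim yes_token no_token delimiter_token := by
  unfold prepend_yes_no_multilabel prepend_yes_no_multilabel_alt
  dsimp only
  rw [PySem.List.foldl_append_singleton_eq_map, List.nil_append]
  rw [List.zip_map_left, List.map_map]
  apply List.map_congr_left
  intro p _
  simp only [Function.comp, Prod.map_fst, Prod.map_snd, id]
  rw [pvRow_eq]

-- ===== VERDICT (by name: the statement is the Claim_ definition above) =====
theorem prepend_yes_no_multilabel_spec : Claim_equal_prepend_yes_no_multilabel := by
  intro words multilabels fdim yes_token no_token delimiter_token _
  exact prepend_yes_no_multilabel_eq words multilabels fdim yes_token no_token delimiter_token
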